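-- pv_equiv track=rewrite | github.com/joaoteodev/lista-atividades-python | utils.py | get_text_list
-- ===== SOURCE A (Python) =====
-- def get_text_list(list_items):
--     size = len(list_items)
--     text = ""
--
--     for x in range(size):
--         if x == size - 2:
--             text += f"{list_items[x]} e "
--             continue
--
--         if x == size - 1:
--             text += f"{list_items[x]}"
--             continue
--
--         text += f"{list_items[x]}, "
--
--     return text
-- ===== SOURCE B (Python) =====
-- def get_text_list(list_items):
--     parts = [str(x) for x in list_items]
--     if not parts:
--         return ""
--     if len(parts) == 1:
--         return parts[0]
--     return ", ".join(parts[:-1]) + " e " + parts[-1]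
-- ===== Notes on version B (the rewrite author's own statement) =====
-- stated objective: simpler
-- what changed: Replaces the indexed loop with per-iteration position checks (x==size-2 / x==size-1) by peeling off the last element: join all but the last with ', ' and append ' e ' plus the last.
import Mathlib
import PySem

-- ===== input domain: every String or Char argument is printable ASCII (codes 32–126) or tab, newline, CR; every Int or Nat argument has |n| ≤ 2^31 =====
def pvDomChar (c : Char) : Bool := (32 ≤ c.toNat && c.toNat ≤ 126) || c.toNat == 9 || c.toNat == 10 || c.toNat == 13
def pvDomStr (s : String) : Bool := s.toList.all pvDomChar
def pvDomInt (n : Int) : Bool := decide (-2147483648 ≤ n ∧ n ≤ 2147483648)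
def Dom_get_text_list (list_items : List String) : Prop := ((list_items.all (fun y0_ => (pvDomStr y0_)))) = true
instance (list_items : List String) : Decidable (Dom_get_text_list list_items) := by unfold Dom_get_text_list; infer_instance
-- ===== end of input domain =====

-- B replaces A's indexed loop with per-position branching by peeling off the last element (join + ' e ' + last); objective: simpler.

-- ===== PORT A =====
-- loop over range(size), branching on x == size-2 / x == size-1 (Int comparisons, as in Python)
def get_text_list (list_items : List String) : String :=
  let size : Int := list_items.length
  (List.range list_items.length).foldl
    (fun (text : String) (x : Nat) =>
      if (x : Int) = size - 2 then text ++ (list_items.getD x "" ++ " e ")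
      else if (x : Int) = size - 1 then text ++ list_items.getD x ""
      else text ++ (list_items.getD x "" ++ ", ")) ""

-- ===== PORT B =====
def get_text_list_alt (list_items : List String) : String :=
  match list_items with
  | [] => ""
  | [a] => a
  | a :: b :: t =>
      String.intercalate ", " ((a :: b :: t).dropLast) ++ " e " ++
        (a :: b :: t).getLast (by simp)

-- ===== PRECONDITION & SPEC =====
def Spec_get_text_list (list_items : List String) (out : String) : Prop := out = get_text_list_alt list_items
instance (list_items : List String) (out : String) : Decidable (Spec_get_text_list list_items out) := by unfold Spec_get_text_list; infer_instance

-- ===== CLAIM (what is proved, stated in full; the proofs are below) =====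
def Claim_equal_get_text_list : Prop := ∀ (list_items : List String), Dom_get_text_list list_items → Spec_get_text_list list_items (get_text_list list_items)

-- ===== LEMMAS AND PROOFS =====

-- the per-index piece appended by A's loop body
def pvPiece (l : List String) (x : Nat) : String :=
  if (x : Int) = (l.length : Int) - 2 then l.getD x "" ++ " e "
  else if (x : Int) = (l.length : Int) - 1 then l.getD x ""
  else l.getD x "" ++ ", "

def pvJoin : List String → String
  | [] => ""
  | s :: L => s ++ pvJoin L

-- structural form of A's loop
def pvLoopA : List String → String
  | [] => ""
  | [a] => a
  | [a, b] => a ++ " e " ++ b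
  | a :: b :: c :: t => a ++ ", " ++ pvLoopA (b :: c :: t)

theorem pvFold_join (g : Nat → String) (xs : List Nat) (s : String) :
    xs.foldl (fun t x => t ++ g x) s = s ++ pvJoin (xs.map g) := by
  induction xs generalizing s with
  | nil => simp [pvJoin]
  | cons a xs ih => simp [List.foldl, ih, pvJoin, String.append_assoc]

theorem pvA_eq_join (l : List String) :
    get_text_list l = pvJoin ((List.range l.length).map (pvPiece l)) := by
  simp only [get_text_list]
  rw [show (fun (text : String) (x : Nat) =>
      if (x : Int) = (l.length : Int) - 2 then text ++ (l.getD x "" ++ " e ")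
      else if (x : Int) = (l.length : Int) - 1 then text ++ l.getD x ""
      else text ++ (l.getD x "" ++ ", "))
    = fun text x => text ++ pvPiece l x from by
      funext t x; unfold pvPiece; split_ifs <;> simp]
  simpa using pvFold_join (pvPiece l) (List.range l.length) ""

theorem pvPiece_shift (a : String) (l : List String) (x : Nat) :
    pvPiece (a :: l) (x + 1) = pvPiece l x := by
  unfold pvPiece
  simp only [List.getD_cons_succ, List.length_cons]
  have h2 : (((x + 1 : Nat)) : Int) = ((l.length + 1 : Nat) : Int) - 2 ↔ ((x : Nat) : Int) = (l.length : Int) - 2 := by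
    push_cast; omega
  have h1 : (((x + 1 : Nat)) : Int) = ((l.length + 1 : Nat) : Int) - 1 ↔ ((x : Nat) : Int) = (l.length : Int) - 1 := by
    push_cast; omega
  simp only [h2, h1]

theorem pvJoin_eq_loopA (l : List String) :
    pvJoin ((List.range l.length).map (pvPiece l)) = pvLoopA l := by
  induction l using pvLoopA.induct with
  | case1 => simp [pvLoopA, pvJoin]
  | case2 a => simp [pvLoopA, pvPiece, pvJoin, List.range_succ]
  | case3 a b =>
      simp [pvLoopA, pvPiece, pvJoin, List.range_succ, String.append_assoc]
  | case4 a b c t ih =>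
      show pvJoin ((List.range ((b :: c :: t).length + 1)).map (pvPiece (a :: b :: c :: t))) = _
      rw [List.range_succ_eq_map]
      simp only [List.map_cons, List.map_map, pvJoin]
      have hshift : (List.range (b :: c :: t).length).map (pvPiece (a :: b :: c :: t) ∘ Nat.succ)
          = (List.range (b :: c :: t).length).map (pvPiece (b :: c :: t)) := by
        apply List.map_congr_left
        intro x _
        exact pvPiece_shift a (b :: c :: t) x
      have h0 : pvPiece (a :: b :: c :: t) 0 = a ++ ", " := by
        unfold pvPiece
        have n2 : ¬ (((0 : Nat)) : Int) = (((a :: b :: c :: t).length : Nat) : Int) - 2 := by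
          simp; omega
        have n1 : ¬ (((0 : Nat)) : Int) = (((a :: b :: c :: t).length : Nat) : Int) - 1 := by
          simp; omega
        simp only [if_neg n2, if_neg n1, List.getD_cons_zero]
      rw [hshift, h0, ih]
      simp [pvLoopA, String.append_assoc]

theorem pvIc_step (s a b : String) (xs : List String) :
    String.intercalate s (a :: b :: xs) = String.intercalate s ((a ++ s ++ b) :: xs) := rfl

theorem pvIc_cons (s a b : String) (xs : List String) :
    String.intercalate s (a :: b :: xs) = a ++ s ++ String.intercalate s (b :: xs) := by
  induction xs generalizing a b with
  | nil => rfl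
  | cons c xs ih => rw [pvIc_step, ih, ih b c]; simp [String.append_assoc]  -- assoc reshuffle

theorem pvAlt_eq_loopA (l : List String) : get_text_list_alt l = pvLoopA l := by
  induction l using pvLoopA.induct with
  | case1 => rfl
  | case2 a => rfl
  | case3 a b => rfl
  | case4 a b c t ih =>
      simp only [get_text_list_alt, pvLoopA] at *
      rw [← ih]
      simp only [List.dropLast_cons₂, pvIc_cons]
      simp [String.append_assoc]

-- ===== VERDICT (by name: the statement is the Claim_ definition above) =====
theorem get_text_list_spec : Claim_equal_get_text_list := by
  intro l _
  unfold Spec_get_text_list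
  rw [pvA_eq_join, pvJoin_eq_loopA, pvAlt_eq_loopA]
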